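/-
  THE TOP OF EVERY PROGRAM'S PROOF: from the stub's walk to the end theorem. Program-independent; a program instantiates it with
  its `Text`, its `Image`, its runtime record (`Asan.Runtime`: the runtime's entry points + the descriptor table of the program's
  registered globals) and the contract of its `prog_main`.

      Top.StartOK R entry globals len u     what the stub needs to know of the state it starts in (every clause is a theorem of
                                            ProgX/Start.lean / ProgX/StartShadow.lean about `startU`, or a fact about the image's data)
      Top.registered                        the shadow layer after `run_ctors`, for any memory with the start state's shadow
      Top.heapInv_empty                     the EMPTY HEAP's invariant (`Asan.HeapInv`) in any memory that still has the start state's heap region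
      Top.ImageData R globals im            the facts about the image's DATA that `StartOK` needs (`.init_array`, the descriptor
                                            table): closed facts about the file's bytes, discharged per image (ProgX/ImageFacts.lean)
      Top.startOK                           the start state satisfies `StartOK`
      Top.StubReaches T exit R entry globals Lay μ u₀
                                            THE STATEMENT OF THE STUB `_start` (not a function: nothing calls it, it does not return):
                                            from a `StartOK` state whose text is that of the reference state the machine reaches
                                            `exit`, through states of `WayInv T`
      Top.staysInCode_of_stub               `StubReaches` at the start state, for every μ c inp ⊢ `StaysInCode im`: THE END THEOREM

  HOW A PROGRAM ASSEMBLES ITS END THEOREM (the toy: Toy/Final.lean is the worked example; the order is bottom-up over the call graph):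
    fix `Lay`, `hLay : Lay.hi = 0x1000000`, `μ`, `hμ`, `u₀`, and the code facts (one `HasCodeNat` per function: from the image);
    one line per unit: `have h_f := f_ok Lay hLay μ hμ u₀ hcode_f h_callee₁ … h_calleeₙ`; the last two are `h_run_ctors` and
    `h_prog_main`; the stub's unit theorem gives `StubReaches`; `staysInCode_of_stub` closes.
-/
import ProgX.Spec.Basic
import ProgX.StartShadow
import Asan.Heap
namespace ProgX
open X86 X86.User Asan

namespace Top

/-- **What the stub needs to know of the state it starts in** (`u` = the start state). `R` = the program's runtime record,
`entry` = the stub's entry, `globals` = the objects of the registered globals (`(R.descs.map GlobalDesc.obj).reverse`), `len` =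
the length of the input.
  registers    RIP at the entry, RSP = 800000H, DF = 0, the SSE exceptions masked (`start_rip`, `start_reg`, `start_df`, `start_sse_masks`)
  params       the six parameter loads (`start_param`)
  ctor, descs  `.init_array` and the descriptor table of the registered globals are in memory (the image's data)
  registered   the shadow layer after `run_ctors`: in any memory `mem'` whose shadow is that of `registerMem mem₁ descs`, for any
               `mem₁` whose shadow is the start state's (run_ctors is entered after the `call` has pushed its return address):
               IN, OUT and the globals live, no protected frame, the stack clean below 800000H
  heap         the heap region [800000H, C00000H) is untouched: its control cell reads 0, all of it is poisoned (the premises of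
               `Asan.HeapInv.empty`; `Top.heapInv_empty` turns them into the heap's invariant at `prog_main`'s entry) -/
structure StartOK (R : Runtime) (entry : Word) (globals : List Obj) (len : Nat) (u : State) : Prop where
  rip : u.rip = entry
  rsp : u.reg .rsp = 0x800000
  inv : abiInv u
  len_le : len ≤ 0x1FF000
  param_in : u.mem.readLE 0x1FF000 8 = 0x200000
  param_len : u.mem.readLE 0x1FF008 8 = len
  param_out : u.mem.readLE 0x1FF010 8 = 0x400000
  param_cap : u.mem.readLE 0x1FF018 8 = 0x300000
  param_heap : u.mem.readLE 0x1FF030 8 = 0x800000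
  param_heap_len : u.mem.readLE 0x1FF038 8 = 0x400000
  ctor : CtorIn u.mem R.sym
  descs : DescsIn u.mem R.table R.descs
  descs_ok : ∀ d, d ∈ R.descs → d.OK
  registered : ∀ mem₁ mem' : Mem, Mem.EqOn 0xC00000 0xE00000 u.mem mem₁ →
    Mem.EqOn 0xC00000 0xE00000 (registerMem mem₁ R.descs) mem' →
    ShadowInv (globals ++ initialObjs len) [] 0x800000 mem'
  /-- the heap region's control cell reads 0 (`start_heap_cell`) -/
  heap_cell : u.mem.readLE 0x800000 8 = 0
  /-- the heap region [800000H, C00000H) is wholly poisoned (`start_heap_poisoned`) -/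
  heap_poisoned : ∀ g, 0x800000 / 8 ≤ g → g < 0xC00000 / 8 → 128 ≤ shadowOf u.mem g

/-- **The shadow layer after `run_ctors`, for any memory `mem₁` with the start state's shadow** (`registered_shadowInv` of
ProgX/StartShadow.lean is the instance `mem₁ = mem₀`; run_ctors is entered after the `call` pushed a return address, and
`registerMem` depends on the shadow bytes only through the memory it starts from). -/
theorem registered (im : Image) (him : im.OK) (c : Nat) (hc : c = 0 ∨ c = 3) (inp : List UInt8)
    (hlen : inp.length ≤ 0x1FF000) (ds : List GlobalDesc) (hok : ∀ d, d ∈ ds → d.OK) (hapart : ds.Pairwise GlobalDesc.Apart)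
    (himg : ∀ d, d ∈ ds → d.beg + d.sizeRz ≤ (im.imageEnd + 7) / 8 * 8)
    (mem₁ mem' : Mem) (h1 : Mem.EqOn 0xC00000 0xE00000 (startU im c inp).mem mem₁)
    (he : Mem.EqOn 0xC00000 0xE00000 (registerMem mem₁ ds) mem') :
    ShadowInv ((ds.map GlobalDesc.obj).reverse ++ initialObjs inp.length) [] 0x800000 mem' := by
  have hend := him.end_le
  have h0 : ShadowInv (initialObjs inp.length) [] 0x800000 mem₁ :=
    (start_shadowInv im him c hc inp hlen).untouched h1
  refine ShadowInv.untouched ?_ he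
  refine h0.register ds hok ?_ hapart ?_
  · intro d hd
    obtain ⟨d1, d2, d3, d4, d5⟩ := hok d hd
    have hclean := (start_imageClean im him c hc inp).mono d4 (himg d hd)
    exact hclean.eqOn (by omega) h1
  · intro d hd o ho
    obtain ⟨d1, d2, d3, d4, d5⟩ := hok d hd
    unfold initialObjs at ho
    simp only [List.mem_cons, List.not_mem_nil, or_false] at ho
    unfold GlobalDesc.Off Obj.gLo Obj.gHi
    rcases ho with rfl | rfl
    · unfold objIN
      simp only
      omega
    · unfold objOUT
      simp only
      omega

/-- **What the composition needs to know about the DATA of the image `im`**, for the runtime record `R`: the descriptors are sane,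
pairwise apart and inside the image (closed facts about `R`: `by decide` in the generated Globals file), and `.init_array` and the
descriptor table are in the start state's memory (closed facts about the file's bytes: ProgX/ImageFacts.lean). -/
structure ImageData (R : Runtime) (im : Image) : Prop where
  ok : im.OK
  descs_ok : ∀ d, d ∈ R.descs → d.OK
  descs_apart : R.descs.Pairwise GlobalDesc.Apart
  descs_in : ∀ d, d ∈ R.descs → d.beg + d.sizeRz ≤ (im.imageEnd + 7) / 8 * 8
  ctor : ∀ (c : Nat) (inp : List UInt8), CtorIn (startU im c inp).mem R.sym
  descs : ∀ (c : Nat) (inp : List UInt8), DescsIn (startU im c inp).mem R.table R.descs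

/-- **The start state satisfies `StartOK`**: the facts of ProgX/Start.lean and ProgX/StartShadow.lean about `startU`, and the data
facts of `ImageData`. -/
theorem startOK {R : Runtime} {im : Image} (hd : ImageData R im) (c : Nat) (hc : c = 0 ∨ c = 3) (inp : List UInt8)
    (hfit : inp.length ≤ 0x1FF000) :
    StartOK R im.entry ((R.descs.map GlobalDesc.obj).reverse) inp.length (startU im c inp) where
  rip := start_rip im c inp
  rsp := by
    rw [start_reg]
    rfl
  inv := ⟨start_df im c inp, start_sse_masks im c inp⟩
  len_le := hfit
  param_in := start_param im c hc inp hfit 0 (by omega)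
  param_len := start_param im c hc inp hfit 1 (by omega)
  param_out := start_param im c hc inp hfit 2 (by omega)
  param_cap := start_param im c hc inp hfit 3 (by omega)
  param_heap := start_param im c hc inp hfit 6 (by omega)
  param_heap_len := start_param im c hc inp hfit 7 (by omega)
  ctor := hd.ctor c inp
  descs := hd.descs c inp
  descs_ok := hd.descs_ok
  registered := fun mem₁ mem' h1 he =>
    registered im hd.ok c hc inp hfit R.descs hd.descs_ok hd.descs_apart hd.descs_in mem₁ mem' h1 he
  heap_cell := start_heap_cell im hd.ok c hc inp hfit
  heap_poisoned := start_heap_poisoned im hd.ok c hc inp hfit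

/-- **THE EMPTY HEAP AT `prog_main`'S ENTRY** (a program with a heap: c/base/heap.c, Asan/Heap.lean). In any memory `mem` that
still has the start state's heap region — the control cell reads 0, every granule of [800000H, C00000H) is poisoned: `run_ctors`
and the stub write only stack bytes and the shadow of the globals' slots — and in which the shadow layer of `rest` holds, the
heap's invariant holds for the EMPTY heap, provided no object of `rest` lies in the heap region (the globals lie in the image,
below 1F0000H; IN and OUT below 700000H: `initialObjs_off_heap`). -/
theorem heapInv_empty {rest : List Obj} {frames : List (Nat × FrameLayout)} {top : Nat} {mem : Mem}
    (hsh : ShadowInv rest frames top mem) (hcell : mem.readLE 0x800000 8 = 0)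
    (hpois : ∀ g, 0x800000 / 8 ≤ g → g < 0xC00000 / 8 → 128 ≤ shadowOf mem g)
    (hout : ∀ o, o ∈ rest → o.base + o.size ≤ 0x800000 ∨ 0xC00000 ≤ o.base) :
    HeapInv (Heap.empty 0x800000 0xC00000) rest frames top mem :=
  HeapInv.empty hsh (by decide) (by decide) (by decide) (Or.inr (by decide)) (by decide) hcell hout hpois

/-- IN and OUT lie below the heap region. -/
theorem initialObjs_off_heap (len : Nat) (hlen : len ≤ 0x1FF000) :
    ∀ o, o ∈ initialObjs len → o.base + o.size ≤ 0x800000 ∨ 0xC00000 ≤ o.base := by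
  intro o ho
  unfold initialObjs at ho
  simp only [List.mem_cons, List.not_mem_nil, or_false] at ho
  rcases ho with rfl | rfl
  · unfold objIN
    simp only
    omega
  · unfold objOUT
    simp only
    omega

/-- **The statement of the stub `_start`** (c/base/start.S): it is not a function — nothing calls it, it does not return — so its
contract is a `ReachVia`, not a `Calls`: from a state `StartOK … len u` whose text is that of the reference state, the machine
reaches `exit` (the `hlt`, not yet executed), through states that are not at `__asan_report` and are inside the text window. The
walk: `call run_ctors` (`runCtorsSpec R`: afterwards `StartOK.registered` gives the shadow layer; the parameter block is outside
its footprint), six loads (`StartOK.param_*`), `call prog_main` (its precondition: the six values, the shadow layer), the stores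
of the results (inside the layout, unchecked), RIP = `exit`. -/
def StubReaches (T : Text) (exit : Word) (R : Runtime) (entry : Word) (globals : List Obj)
    (Lay : Layout) (μ : Microarch) (u₀ : State) : Prop :=
  ∀ (len : Nat) (u : State), StartOK R entry globals len u → CodeOK T u₀ u.mem →
    ReachVia Lay μ (WayInv T) u (fun v => v.rip = exit)

/-- **The stub's statement for a program that READS ITS IMAGE'S DATA**: as `StubReaches`, with one more hypothesis `D u.mem` about the
start memory. `D` says what the image's initialised data holds (a program's constant tables in `.rodata` / `.data`: `StartOK` and
`MainPre` say nothing of their contents); the base's `Top.stub_reachesD` carries a `D` that is stable under agreement on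
[100000H, 700000H) from the start state to `prog_main`'s entry, where the program's precondition may use it. At the start state
`D` is a closed fact about the file's bytes (`ImageFacts`: `image_readLE`), discharged per program in `staysInCode_of_stubD`. -/
def StubReachesD (T : Text) (exit : Word) (R : Runtime) (entry : Word) (globals : List Obj) (D : Mem → Prop)
    (Lay : Layout) (μ : Microarch) (u₀ : State) : Prop :=
  ∀ (len : Nat) (u : State), StartOK R entry globals len u → D u.mem → CodeOK T u₀ u.mem →
    ReachVia Lay μ (WayInv T) u (fun v => v.rip = exit)

/-- `StubReaches` is `StubReachesD` with no data hypothesis. -/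
theorem stubReaches_iff_D {T : Text} {exit : Word} {R : Runtime} {entry : Word} {globals : List Obj}
    {Lay : Layout} {μ : Microarch} {u₀ : State} :
    StubReaches T exit R entry globals Lay μ u₀ ↔ StubReachesD T exit R entry globals (fun _ => True) Lay μ u₀ := by
  constructor
  · intro h len u hst _ hco
    exact h len u hst hco
  · intro h len u hst hco
    exact h len u hst True.intro hco

/-- **FROM THE STUB TO THE END THEOREM.** `u₀` := the start state (`CodeOK T u₀ u₀.mem` by reflexivity), `Lay` := the start layout
(`startLayout_hi`); the invariant of the way is the one `StaysInCode.of_reachVia` asks for (`wayInv_iff`). `hstub` is what the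
bottom-up composition of the program's units ends in: the stub's statement with every callee hypothesis discharged, at the start
layout and the start state. -/
theorem staysInCode_of_stub {T : Text} {R : Runtime} {im : Image} (hT : T.Of im) (hd : ImageData R im)
    (hstub : ∀ (μ : Microarch), UserX.MicroOK μ → ∀ (c : Nat) (hc : c = 0 ∨ c = 3) (inp : List UInt8),
      StubReaches T im.exit R im.entry ((R.descs.map GlobalDesc.obj).reverse) (startLayout c hc) μ (startU im c inp)) :
    StaysInCode im := by
  apply StaysInCode.of_reachVia
  intro μ hμ c hc inp hfit
  have hreach := hstub μ hμ c hc inp inp.length (startU im c inp) (startOK hd c hc inp hfit) (Mem.EqOn.refl _ _ _)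
  exact hreach.weaken (fun v hv => (wayInv_iff hT v).mp hv)

/-- **FROM THE STUB TO THE END THEOREM, with the image's data.** As `staysInCode_of_stub`; `hD`: `D` holds of every start memory (a
closed fact about the file's bytes, per program: `ProgX.image_readLE`). -/
theorem staysInCode_of_stubD {T : Text} {R : Runtime} {im : Image} (hT : T.Of im) (hd : ImageData R im) (D : Mem → Prop)
    (hD : ∀ (c : Nat) (inp : List UInt8), D (startU im c inp).mem)
    (hstub : ∀ (μ : Microarch), UserX.MicroOK μ → ∀ (c : Nat) (hc : c = 0 ∨ c = 3) (inp : List UInt8),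
      StubReachesD T im.exit R im.entry ((R.descs.map GlobalDesc.obj).reverse) D (startLayout c hc) μ (startU im c inp)) :
    StaysInCode im := by
  apply StaysInCode.of_reachVia
  intro μ hμ c hc inp hfit
  have hreach := hstub μ hμ c hc inp inp.length (startU im c inp) (startOK hd c hc inp hfit) (hD c inp) (Mem.EqOn.refl _ _ _)
  exact hreach.weaken (fun v hv => (wayInv_iff hT v).mp hv)

end Top

end ProgX
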